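-- pv_equiv track=rewrite | github.com/Tymotheus/aoc2024 | 08/08.py | add_resonant_antinodes
-- ===== SOURCE A (Python) =====
-- def add_resonant_antinodes(res_antinodes, a1_r, a1_c, a2_r, a2_c, R, C):
--     # Adds antinodes position, for given antennas, to the set of antinodes
--     # Move towards antenna 1, check how many antinodes fit within the grid
--     # These are basically vector calculations
--     i = j = 0
--     an_1_r = a1_r + (i) * (a1_r - a2_r)
--     an_1_c = a1_c + (i) * (a1_c - a2_c)
--     while check_boundaries(an_1_r, an_1_c, R, C):
--       res_antinodes.add((an_1_r, an_1_c))
--       i+=1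
--       an_1_r = a1_r + (i) * (a1_r - a2_r)
--       an_1_c = a1_c + (i) * (a1_c - a2_c)
--     # Move towards antenna 2, check how many antinodes fit within the grid
--     an_2_r = a2_r + (j) * (a2_r - a1_r)
--     an_2_c = a2_c + (j) * (a2_c - a1_c)
--     while check_boundaries(an_2_r, an_2_c, R, C):
--         res_antinodes.add((an_2_r, an_2_c))
--         j += 1
--         an_2_r = a2_r + (j) * (a2_r - a1_r)
--         an_2_c = a2_c + (j) * (a2_c - a1_c)
--     return res_antinodes
--
-- def check_boundaries(r,c, R, C):
--     # Check whether given position sits withing the given grid limits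
--     return R > r >= 0 and C > c >= 0
-- ===== SOURCE B (Python) =====
-- def _steps(r0, c0, d_r, d_c, R, C):
--     # number of k >= 0 such that (r0 + k*d_r, c0 + k*d_c) stays inside the grid,
--     # (d_r, d_c) != (0, 0); the valid k form the interval [0, min(hs))
--     if not (0 <= r0 < R and 0 <= c0 < C):
--         return 0
--     hs = []
--     if d_r > 0:
--         hs.append((R - 1 - r0) // d_r + 1)
--     elif d_r < 0:
--         hs.append(r0 // (-d_r) + 1)
--     if d_c > 0:
--         hs.append((C - 1 - c0) // d_c + 1)
--     elif d_c < 0: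
--         hs.append(c0 // (-d_c) + 1)
--     return min(hs)
--
-- def add_resonant_antinodes(res_antinodes, a1_r, a1_c, a2_r, a2_c, R, C):
--     dr = a1_r - a2_r
--     dc = a1_c - a2_c
--     if dr == 0 and dc == 0:
--         # degenerate pair: the whole line is the single point itself
--         if 0 <= a1_r < R and 0 <= a1_c < C:
--             res_antinodes.add((a1_r, a1_c))
--         return res_antinodes
--     for r0, c0, sr, sc in ((a1_r, a1_c, dr, dc), (a2_r, a2_c, -dr, -dc)):
--         res_antinodes.update((r0 + k * sr, c0 + k * sc)
--                              for k in range(_steps(r0, c0, sr, sc, R, C)))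
--     return res_antinodes
-- ===== Notes on version B (the rewrite author's own statement) =====
-- stated objective: alternative
-- what changed: Replaces the two boundary-checked stepping while-loops by a closed-form computation (floor divisions) of the number of in-grid multiples along each direction, followed by a single range() pass per direction.
import Mathlib
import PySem

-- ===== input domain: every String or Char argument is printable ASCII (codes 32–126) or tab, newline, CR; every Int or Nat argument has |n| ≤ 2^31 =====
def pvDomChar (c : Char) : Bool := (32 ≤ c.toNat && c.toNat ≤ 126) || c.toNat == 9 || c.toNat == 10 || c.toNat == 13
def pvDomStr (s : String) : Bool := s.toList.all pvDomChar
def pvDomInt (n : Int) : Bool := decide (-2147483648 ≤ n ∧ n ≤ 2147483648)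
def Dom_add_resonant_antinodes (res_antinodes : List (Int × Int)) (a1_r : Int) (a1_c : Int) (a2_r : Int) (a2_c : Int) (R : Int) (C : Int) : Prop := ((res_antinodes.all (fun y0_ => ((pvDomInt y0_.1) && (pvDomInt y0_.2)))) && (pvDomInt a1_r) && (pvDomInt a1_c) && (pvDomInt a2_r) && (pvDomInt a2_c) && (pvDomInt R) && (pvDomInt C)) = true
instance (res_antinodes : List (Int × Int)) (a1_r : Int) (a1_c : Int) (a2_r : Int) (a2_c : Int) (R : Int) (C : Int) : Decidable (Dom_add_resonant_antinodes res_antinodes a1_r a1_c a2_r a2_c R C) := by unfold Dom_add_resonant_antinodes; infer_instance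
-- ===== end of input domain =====

-- B replaces A's two boundary-checked stepping while-loops by a closed-form count of the
-- in-grid multiples along each direction (floor divisions) plus one range() pass per direction.
-- A mutates the argument set in place; the equivalence proved here is about the RETURN value only
-- (B performs the same mutation in Python).

-- ===== PORT A =====
def pv_check_boundaries (r c R C : Int) : Bool :=
  decide (R > r) && decide (r ≥ 0) && decide (C > c) && decide (c ≥ 0)

-- the common shape of A's two while-loops (fuel only makes the recursion total; inside Pre_ the
-- loop always stops before the fuel runs out)
def pvLoopA (base_r base_c d_r d_c R C : Int) (s : List (Int × Int)) (i : Int) : Nat → List (Int × Int)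
  | 0 => s
  | Nat.succ f =>
    let an_r := base_r + i * d_r
    let an_c := base_c + i * d_c
    if pv_check_boundaries an_r an_c R C then
      pvLoopA base_r base_c d_r d_c R C (PySem.Set.add s (an_r, an_c)) (i + 1) f
    else s

def add_resonant_antinodes (res_antinodes : List (Int × Int)) (a1_r : Int) (a1_c : Int) (a2_r : Int) (a2_c : Int) (R : Int) (C : Int) : List (Int × Int) :=
  let fuel := R.toNat + C.toNat + 2
  let s1 := pvLoopA a1_r a1_c (a1_r - a2_r) (a1_c - a2_c) R C res_antinodes 0 fuel
  pvLoopA a2_r a2_c (a2_r - a1_r) (a2_c - a1_c) R C s1 0 fuel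

-- ===== PORT B =====
-- Source B's _steps: closed-form number of k ≥ 0 keeping (r0+k*d_r, c0+k*d_c) inside the grid
def pvSteps (r0 c0 d_r d_c R C : Int) : Int :=
  if 0 ≤ r0 ∧ r0 < R ∧ 0 ≤ c0 ∧ c0 < C then
    let hs : List Int :=
      (if d_r > 0 then [PySem.Int.floordiv (R - 1 - r0) d_r + 1]
       else if d_r < 0 then [PySem.Int.floordiv r0 (-d_r) + 1] else [])
      ++
      (if d_c > 0 then [PySem.Int.floordiv (C - 1 - c0) d_c + 1]
       else if d_c < 0 then [PySem.Int.floordiv c0 (-d_c) + 1] else [])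
    match hs with
    | [] => 0          -- unreachable: (d_r, d_c) ≠ (0, 0) at every call site (Python's min would raise)
    | h :: t => t.foldl min h
  else 0

-- one iteration of Source B's for-loop: res.update(... for k in range(_steps(...)))
def pvUpdateLine (s : List (Int × Int)) (r0 c0 sr sc R C : Int) : List (Int × Int) :=
  (PySem.List.pyRange 0 (pvSteps r0 c0 sr sc R C) 1).foldl
    (fun s k => PySem.Set.add s (r0 + k * sr, c0 + k * sc)) s

def add_resonant_antinodes_alt (res_antinodes : List (Int × Int)) (a1_r : Int) (a1_c : Int) (a2_r : Int) (a2_c : Int) (R : Int) (C : Int) : List (Int × Int) :=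
  let dr := a1_r - a2_r
  let dc := a1_c - a2_c
  if dr = 0 ∧ dc = 0 then
    if 0 ≤ a1_r ∧ a1_r < R ∧ 0 ≤ a1_c ∧ a1_c < C then PySem.Set.add res_antinodes (a1_r, a1_c)
    else res_antinodes
  else
    pvUpdateLine (pvUpdateLine res_antinodes a1_r a1_c dr dc R C) a2_r a2_c (-dr) (-dc) R C

-- ===== PRECONDITION & SPEC =====
-- Pre_ excludes exactly the inputs on which A DIVERGES: coinciding antennas whose common point
-- lies inside the grid make A's first while-loop spin forever on that point.
def Pre_add_resonant_antinodes (res_antinodes : List (Int × Int)) (a1_r : Int) (a1_c : Int) (a2_r : Int) (a2_c : Int) (R : Int) (C : Int) : Prop :=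
  ¬ (a1_r = a2_r ∧ a1_c = a2_c ∧ 0 ≤ a1_r ∧ a1_r < R ∧ 0 ≤ a1_c ∧ a1_c < C)
instance (res_antinodes : List (Int × Int)) (a1_r : Int) (a1_c : Int) (a2_r : Int) (a2_c : Int) (R : Int) (C : Int) : Decidable (Pre_add_resonant_antinodes res_antinodes a1_r a1_c a2_r a2_c R C) := by unfold Pre_add_resonant_antinodes; infer_instance

def pvWitness_add_resonant_antinodes : (List (Int × Int)) × Int × Int × Int × Int × Int × Int :=
  ([(0, 0)], 1, 1, 2, 2, 5, 5)

def Spec_add_resonant_antinodes (res_antinodes : List (Int × Int)) (a1_r : Int) (a1_c : Int) (a2_r : Int) (a2_c : Int) (R : Int) (C : Int) (out : List (Int × Int)) : Prop := out = add_resonant_antinodes_alt res_antinodes a1_r a1_c a2_r a2_c R C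
instance (res_antinodes : List (Int × Int)) (a1_r : Int) (a1_c : Int) (a2_r : Int) (a2_c : Int) (R : Int) (C : Int) (out : List (Int × Int)) : Decidable (Spec_add_resonant_antinodes res_antinodes a1_r a1_c a2_r a2_c R C out) := by unfold Spec_add_resonant_antinodes; infer_instance

-- ===== CLAIM (what is proved, stated in full; the proofs are below) =====
def Claim_equal_add_resonant_antinodes : Prop := ∀ (res_antinodes : List (Int × Int)) (a1_r : Int) (a1_c : Int) (a2_r : Int) (a2_c : Int) (R : Int) (C : Int), Dom_add_resonant_antinodes res_antinodes a1_r a1_c a2_r a2_c R C → Pre_add_resonant_antinodes res_antinodes a1_r a1_c a2_r a2_c R C → Spec_add_resonant_antinodes res_antinodes a1_r a1_c a2_r a2_c R C (add_resonant_antinodes res_antinodes a1_r a1_c a2_r a2_c R C)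

-- ===== LEMMAS AND PROOFS =====

-- per-axis characterisation of Source B's bound for a positive step
lemma pv_axis_pos (x0 d B : Int) (hd : 0 < d) (h0 : 0 ≤ x0) (_hB : x0 < B) (k : Int) (hk : 0 ≤ k) :
    (0 ≤ x0 + k * d ∧ x0 + k * d < B) ↔ k < PySem.Int.floordiv (B - 1 - x0) d + 1 := by
  have hbr : ∀ q : Int, q ≤ PySem.Int.floordiv (B - 1 - x0) d ↔ q * d ≤ B - 1 - x0 :=
    fun q => PySem.Int.le_floordiv_iff_mul_le hd
  constructor
  · rintro ⟨-, hlt⟩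
    have : k * d ≤ B - 1 - x0 := by linarith
    have := (hbr k).mpr this
    omega
  · intro h
    have h1 : k * d ≤ B - 1 - x0 := (hbr k).mp (by omega)
    have h2 : 0 ≤ k * d := mul_nonneg hk hd.le
    constructor <;> linarith

-- per-axis characterisation for a negative step
lemma pv_axis_neg (x0 d B : Int) (hd : d < 0) (_h0 : 0 ≤ x0) (hB : x0 < B) (k : Int) (hk : 0 ≤ k) :
    (0 ≤ x0 + k * d ∧ x0 + k * d < B) ↔ k < PySem.Int.floordiv x0 (-d) + 1 := by
  have hbr : ∀ q : Int, q ≤ PySem.Int.floordiv x0 (-d) ↔ q * (-d) ≤ x0 :=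
    fun q => PySem.Int.le_floordiv_iff_mul_le (by omega)
  constructor
  · rintro ⟨hge, -⟩
    have : k * (-d) ≤ x0 := by nlinarith
    have := (hbr k).mpr this
    omega
  · intro h
    have h1 : k * (-d) ≤ x0 := (hbr k).mp (by omega)
    have h2 : k * d ≤ 0 := mul_nonpos_of_nonneg_of_nonpos hk hd.le
    constructor <;> nlinarith

-- combining two axis interval characterisations: valid multipliers = [0, min)
lemma pv_two_axis_char (r0 c0 d_r d_c R C nr nc : Int)
    (hnrR : nr ≤ R) (hncC : nc ≤ C) (h1r : 1 ≤ nr) (h1c : 1 ≤ nc)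
    (Hr : ∀ k, 0 ≤ k → ((0 ≤ r0 + k * d_r ∧ r0 + k * d_r < R) ↔ k < nr))
    (Hc : ∀ k, 0 ≤ k → ((0 ≤ c0 + k * d_c ∧ c0 + k * d_c < C) ↔ k < nc)) :
    0 ≤ min nr nc ∧ (min nr nc).toNat ≤ R.toNat + C.toNat ∧
    (∀ k, 0 ≤ k → k ≤ min nr nc →
      ((0 ≤ r0 + k * d_r ∧ r0 + k * d_r < R ∧ 0 ≤ c0 + k * d_c ∧ c0 + k * d_c < C) ↔
        k < min nr nc)) := by
  refine ⟨by omega, by omega, ?_⟩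
  intro k hk _
  constructor
  · rintro ⟨h1, h2, h3, h4⟩
    have a1 := (Hr k hk).mp ⟨h1, h2⟩
    have a2 := (Hc k hk).mp ⟨h3, h4⟩
    omega
  · intro h
    obtain ⟨b1, b2⟩ := (Hr k hk).mpr (by omega)
    obtain ⟨b3, b4⟩ := (Hc k hk).mpr (by omega)
    exact ⟨b1, b2, b3, b4⟩

-- one constrained axis (the other direction component is zero)
lemma pv_one_axis_char (r0 c0 d_r d_c R C n : Int)
    (hn : n ≤ R + C) (h1 : 1 ≤ n) (hR : 0 ≤ R) (hC : 0 ≤ C)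
    (Hr : ∀ k, 0 ≤ k → (0 ≤ r0 + k * d_r ∧ r0 + k * d_r < R))
    (Hc : ∀ k, 0 ≤ k → ((0 ≤ c0 + k * d_c ∧ c0 + k * d_c < C) ↔ k < n)) :
    0 ≤ n ∧ n.toNat ≤ R.toNat + C.toNat ∧
    (∀ k, 0 ≤ k → k ≤ n →
      ((0 ≤ r0 + k * d_r ∧ r0 + k * d_r < R ∧ 0 ≤ c0 + k * d_c ∧ c0 + k * d_c < C) ↔ k < n)) := by
  refine ⟨by omega, by omega, ?_⟩
  intro k hk _
  constructor
  · rintro ⟨-, -, h3, h4⟩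
    exact (Hc k hk).mp ⟨h3, h4⟩
  · intro h
    obtain ⟨b1, b2⟩ := Hr k hk
    obtain ⟨b3, b4⟩ := (Hc k hk).mpr h
    exact ⟨b1, b2, b3, b4⟩

-- pvSteps is nonnegative, bounded by the grid, and cuts the line at exactly the first
-- out-of-grid multiple (the valid multipliers form the interval [0, pvSteps))
lemma pvSteps_char (r0 c0 d_r d_c R C : Int) (hnz : ¬ (d_r = 0 ∧ d_c = 0)) :
    0 ≤ pvSteps r0 c0 d_r d_c R C ∧
    (pvSteps r0 c0 d_r d_c R C).toNat ≤ R.toNat + C.toNat ∧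
    (∀ k, 0 ≤ k → k ≤ pvSteps r0 c0 d_r d_c R C →
      ((0 ≤ r0 + k * d_r ∧ r0 + k * d_r < R ∧ 0 ≤ c0 + k * d_c ∧ c0 + k * d_c < C) ↔
        k < pvSteps r0 c0 d_r d_c R C)) := by
  by_cases hin : 0 ≤ r0 ∧ r0 < R ∧ 0 ≤ c0 ∧ c0 < C
  · obtain ⟨hr0, hrR, hc0, hcC⟩ := hin
    -- the four candidate axis counts, with their bounds and positivity
    have hRpos : 0 < d_r →
        PySem.Int.floordiv (R - 1 - r0) d_r + 1 ≤ R ∧ 1 ≤ PySem.Int.floordiv (R - 1 - r0) d_r + 1 := by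
      intro hd
      have h1 : PySem.Int.floordiv (R - 1 - r0) d_r ≤ R - 1 - r0 := by
        rw [PySem.Int.floordiv_eq_ediv_of_pos hd]
        exact Int.ediv_le_self _ (by omega)
      have h2 := (PySem.Int.le_floordiv_iff_mul_le (a := R - 1 - r0) (q := 0) hd).mpr (by omega)
      omega
    have hRneg : d_r < 0 →
        PySem.Int.floordiv r0 (-d_r) + 1 ≤ R ∧ 1 ≤ PySem.Int.floordiv r0 (-d_r) + 1 := by
      intro hd
      have h1 : PySem.Int.floordiv r0 (-d_r) ≤ r0 := by
        rw [PySem.Int.floordiv_eq_ediv_of_pos (by omega)]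
        exact Int.ediv_le_self _ hr0
      have h2 := (PySem.Int.le_floordiv_iff_mul_le (a := r0) (q := 0) (b := -d_r) (by omega)).mpr (by omega)
      omega
    have hCpos : 0 < d_c →
        PySem.Int.floordiv (C - 1 - c0) d_c + 1 ≤ C ∧ 1 ≤ PySem.Int.floordiv (C - 1 - c0) d_c + 1 := by
      intro hd
      have h1 : PySem.Int.floordiv (C - 1 - c0) d_c ≤ C - 1 - c0 := by
        rw [PySem.Int.floordiv_eq_ediv_of_pos hd]
        exact Int.ediv_le_self _ (by omega)
      have h2 := (PySem.Int.le_floordiv_iff_mul_le (a := C - 1 - c0) (q := 0) hd).mpr (by omega)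
      omega
    have hCneg : d_c < 0 →
        PySem.Int.floordiv c0 (-d_c) + 1 ≤ C ∧ 1 ≤ PySem.Int.floordiv c0 (-d_c) + 1 := by
      intro hd
      have h1 : PySem.Int.floordiv c0 (-d_c) ≤ c0 := by
        rw [PySem.Int.floordiv_eq_ediv_of_pos (by omega)]
        exact Int.ediv_le_self _ hc0
      have h2 := (PySem.Int.le_floordiv_iff_mul_le (a := c0) (q := 0) (b := -d_c) (by omega)).mpr (by omega)
      omega
    have hrow0 : d_r = 0 → ∀ k : Int, 0 ≤ k → (0 ≤ r0 + k * d_r ∧ r0 + k * d_r < R) := by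
      intro hd k _; rw [hd]; constructor <;> omega
    have hcol0 : d_c = 0 → ∀ k : Int, 0 ≤ k → (0 ≤ c0 + k * d_c ∧ c0 + k * d_c < C) := by
      intro hd k _; rw [hd]; constructor <;> omega
    rcases lt_trichotomy d_r 0 with hdr | hdr | hdr <;>
      rcases lt_trichotomy d_c 0 with hdc | hdc | hdc
    · -- d_r < 0, d_c < 0
      have hsimp : pvSteps r0 c0 d_r d_c R C =
          min (PySem.Int.floordiv r0 (-d_r) + 1) (PySem.Int.floordiv c0 (-d_c) + 1) := by
        simp only [pvSteps, if_neg (by omega : ¬ d_r > 0),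
          if_pos hdr, if_neg (by omega : ¬ d_c > 0), if_pos hdc, List.cons_append,
          List.nil_append, List.foldl_cons, List.foldl_nil]
        exact if_pos ⟨hr0, hrR, hc0, hcC⟩
      rw [hsimp]
      exact pv_two_axis_char r0 c0 d_r d_c R C _ _ (hRneg hdr).1 (hCneg hdc).1
        (hRneg hdr).2 (hCneg hdc).2
        (fun k hk => pv_axis_neg r0 d_r R hdr hr0 hrR k hk)
        (fun k hk => pv_axis_neg c0 d_c C hdc hc0 hcC k hk)
    · -- d_r < 0, d_c = 0
      have hsimp : pvSteps r0 c0 d_r d_c R C = PySem.Int.floordiv r0 (-d_r) + 1 := by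
        simp only [pvSteps, if_neg (by omega : ¬ d_r > 0),
          if_pos hdr, if_neg (by omega : ¬ d_c > 0), if_neg (by omega : ¬ d_c < 0),
          List.append_nil, List.foldl_nil]
        exact if_pos ⟨hr0, hrR, hc0, hcC⟩
      rw [hsimp]
      have h := pv_one_axis_char c0 r0 d_c d_r C R _ (by omega) (hRneg hdr).2 (by omega) (by omega)
        (hcol0 hdc) (fun k hk => pv_axis_neg r0 d_r R hdr hr0 hrR k hk)
      refine ⟨h.1, by omega, fun k hk hkn => ?_⟩
      have := (h.2.2 k hk hkn)
      constructor
      · rintro ⟨a1, a2, a3, a4⟩; exact this.mp ⟨a3, a4, a1, a2⟩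
      · intro hh; obtain ⟨b1, b2, b3, b4⟩ := this.mpr hh; exact ⟨b3, b4, b1, b2⟩
    · -- d_r < 0, d_c > 0
      have hsimp : pvSteps r0 c0 d_r d_c R C =
          min (PySem.Int.floordiv r0 (-d_r) + 1) (PySem.Int.floordiv (C - 1 - c0) d_c + 1) := by
        simp only [pvSteps, if_neg (by omega : ¬ d_r > 0),
          if_pos hdr, if_pos hdc, List.cons_append, List.nil_append, List.foldl_cons,
          List.foldl_nil]
        exact if_pos ⟨hr0, hrR, hc0, hcC⟩
      rw [hsimp]
      exact pv_two_axis_char r0 c0 d_r d_c R C _ _ (hRneg hdr).1 (hCpos hdc).1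
        (hRneg hdr).2 (hCpos hdc).2
        (fun k hk => pv_axis_neg r0 d_r R hdr hr0 hrR k hk)
        (fun k hk => pv_axis_pos c0 d_c C hdc hc0 hcC k hk)
    · -- d_r = 0, d_c < 0
      have hsimp : pvSteps r0 c0 d_r d_c R C = PySem.Int.floordiv c0 (-d_c) + 1 := by
        simp only [pvSteps, if_neg (by omega : ¬ d_r > 0),
          if_neg (by omega : ¬ d_r < 0), if_neg (by omega : ¬ d_c > 0), if_pos hdc,
          List.nil_append, List.foldl_nil]
        exact if_pos ⟨hr0, hrR, hc0, hcC⟩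
      rw [hsimp]
      exact pv_one_axis_char r0 c0 d_r d_c R C _ (by omega) (hCneg hdc).2 (by omega) (by omega)
        (hrow0 hdr) (fun k hk => pv_axis_neg c0 d_c C hdc hc0 hcC k hk)
    · exact absurd ⟨hdr, hdc⟩ hnz
    · -- d_r = 0, d_c > 0
      have hsimp : pvSteps r0 c0 d_r d_c R C = PySem.Int.floordiv (C - 1 - c0) d_c + 1 := by
        simp only [pvSteps, if_neg (by omega : ¬ d_r > 0),
          if_neg (by omega : ¬ d_r < 0), if_pos hdc, List.nil_append, List.foldl_nil]
        exact if_pos ⟨hr0, hrR, hc0, hcC⟩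
      rw [hsimp]
      exact pv_one_axis_char r0 c0 d_r d_c R C _ (by omega) (hCpos hdc).2 (by omega) (by omega)
        (hrow0 hdr) (fun k hk => pv_axis_pos c0 d_c C hdc hc0 hcC k hk)
    · -- d_r > 0, d_c < 0
      have hsimp : pvSteps r0 c0 d_r d_c R C =
          min (PySem.Int.floordiv (R - 1 - r0) d_r + 1) (PySem.Int.floordiv c0 (-d_c) + 1) := by
        simp only [pvSteps, if_pos hdr,
          if_neg (by omega : ¬ d_c > 0), if_pos hdc, List.cons_append, List.nil_append,
          List.foldl_cons, List.foldl_nil]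
        exact if_pos ⟨hr0, hrR, hc0, hcC⟩
      rw [hsimp]
      exact pv_two_axis_char r0 c0 d_r d_c R C _ _ (hRpos hdr).1 (hCneg hdc).1
        (hRpos hdr).2 (hCneg hdc).2
        (fun k hk => pv_axis_pos r0 d_r R hdr hr0 hrR k hk)
        (fun k hk => pv_axis_neg c0 d_c C hdc hc0 hcC k hk)
    · -- d_r > 0, d_c = 0
      have hsimp : pvSteps r0 c0 d_r d_c R C = PySem.Int.floordiv (R - 1 - r0) d_r + 1 := by
        simp only [pvSteps, if_pos hdr,
          if_neg (by omega : ¬ d_c > 0), if_neg (by omega : ¬ d_c < 0),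
          List.append_nil, List.foldl_nil]
        exact if_pos ⟨hr0, hrR, hc0, hcC⟩
      rw [hsimp]
      have h := pv_one_axis_char c0 r0 d_c d_r C R _ (by omega) (hRpos hdr).2 (by omega) (by omega)
        (hcol0 hdc) (fun k hk => pv_axis_pos r0 d_r R hdr hr0 hrR k hk)
      refine ⟨h.1, by omega, fun k hk hkn => ?_⟩
      have := (h.2.2 k hk hkn)
      constructor
      · rintro ⟨a1, a2, a3, a4⟩; exact this.mp ⟨a3, a4, a1, a2⟩
      · intro hh; obtain ⟨b1, b2, b3, b4⟩ := this.mpr hh; exact ⟨b3, b4, b1, b2⟩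
    · -- d_r > 0, d_c > 0
      have hsimp : pvSteps r0 c0 d_r d_c R C =
          min (PySem.Int.floordiv (R - 1 - r0) d_r + 1) (PySem.Int.floordiv (C - 1 - c0) d_c + 1) := by
        simp only [pvSteps, if_pos hdr, if_pos hdc,
          List.cons_append, List.nil_append, List.foldl_cons, List.foldl_nil]
        exact if_pos ⟨hr0, hrR, hc0, hcC⟩
      rw [hsimp]
      exact pv_two_axis_char r0 c0 d_r d_c R C _ _ (hRpos hdr).1 (hCpos hdc).1
        (hRpos hdr).2 (hCpos hdc).2
        (fun k hk => pv_axis_pos r0 d_r R hdr hr0 hrR k hk)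
        (fun k hk => pv_axis_pos c0 d_c C hdc hc0 hcC k hk)
  · refine ⟨?_, ?_, ?_⟩
    · simp [pvSteps, hin]
    · simp [pvSteps, hin]
    · intro k hk hkn
      simp only [pvSteps, if_neg hin] at hkn ⊢
      constructor
      · intro h
        have hk0 : k = 0 := by omega
        subst hk0
        simp only [zero_mul, add_zero] at h
        exact absurd ⟨h.1, h.2.1, h.2.2.1, h.2.2.2⟩ hin
      · omega

-- if the first position checked is outside the grid, A's loop returns the set unchanged
lemma pvLoopA_stop (base_r base_c d_r d_c R C : Int) (s : List (Int × Int)) (i : Int) (fuel : Nat)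
    (h : pv_check_boundaries (base_r + i * d_r) (base_c + i * d_c) R C = false) :
    pvLoopA base_r base_c d_r d_c R C s i fuel = s := by
  cases fuel with
  | zero => rfl
  | succ f => simp [pvLoopA, h]

-- A's while-loop, run with enough fuel, performs exactly B's fold over range(i, n)
lemma pvLoopA_eq_fold (base_r base_c d_r d_c R C : Int) :
    ∀ (fuel : Nat) (s : List (Int × Int)) (i n : Int),
      0 ≤ i → i ≤ n → (n - i).toNat ≤ fuel →
      (∀ k, i ≤ k → k ≤ n →
        ((0 ≤ base_r + k * d_r ∧ base_r + k * d_r < R ∧ 0 ≤ base_c + k * d_c ∧ base_c + k * d_c < C) ↔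
          k < n)) →
      pvLoopA base_r base_c d_r d_c R C s i fuel =
        (PySem.List.pyRange i n 1).foldl
          (fun s k => PySem.Set.add s (base_r + k * d_r, base_c + k * d_c)) s := by
  intro fuel
  induction fuel with
  | zero =>
    intro s i n hi hin hfuel hchar
    have : i = n := by omega
    subst this
    rw [PySem.List.pyRange_one_eq_nil le_rfl]
    rfl
  | succ f ih =>
    intro s i n hi hin hfuel hchar
    by_cases hb : (0 ≤ base_r + i * d_r ∧ base_r + i * d_r < R ∧ 0 ≤ base_c + i * d_c ∧ base_c + i * d_c < C)
    · have hlt : i < n := (hchar i le_rfl hin).mp hb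
      have hcheck : pv_check_boundaries (base_r + i * d_r) (base_c + i * d_c) R C = true := by
        simp only [pv_check_boundaries, Bool.and_eq_true, decide_eq_true_iff]
        exact ⟨⟨⟨hb.2.1, hb.1⟩, hb.2.2.2⟩, hb.2.2.1⟩
      rw [PySem.List.pyRange_one_cons hlt, List.foldl_cons]
      simp only [pvLoopA, hcheck, if_true]
      exact ih _ (i + 1) n (by omega) (by omega) (by omega)
        (fun k hk hkn => hchar k (by omega) hkn)
    · have hge : ¬ i < n := fun h => hb ((hchar i le_rfl hin).mpr h)
      have : i = n := by omega
      subst this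
      rw [PySem.List.pyRange_one_eq_nil le_rfl, List.foldl_nil]
      apply pvLoopA_stop
      simp only [pv_check_boundaries, Bool.and_eq_false_iff, decide_eq_false_iff_not]
      by_contra hc
      push Not at hc
      exact hb ⟨hc.1.1.2, hc.1.1.1, hc.2, hc.1.2⟩

-- ===== VERDICT (by name: the statement is the Claim_ definition above) =====
theorem add_resonant_antinodes_spec : Claim_equal_add_resonant_antinodes := by
  intro s a1_r a1_c a2_r a2_c R C _ hpre
  unfold Spec_add_resonant_antinodes add_resonant_antinodes add_resonant_antinodes_alt
  dsimp only
  by_cases hdeg : a1_r - a2_r = 0 ∧ a1_c - a2_c = 0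
  · -- coinciding antennas: Pre_ says the point is outside the grid, both sides return s (up to the add)
    have hout : ¬ (0 ≤ a1_r ∧ a1_r < R ∧ 0 ≤ a1_c ∧ a1_c < C) := by
      intro h
      exact hpre ⟨by omega, by omega, h.1, h.2.1, h.2.2.1, h.2.2.2⟩
    have hcheck : pv_check_boundaries (a1_r + 0 * (a1_r - a2_r)) (a1_c + 0 * (a1_c - a2_c)) R C = false := by
      simp only [zero_mul, add_zero, pv_check_boundaries, Bool.and_eq_false_iff,
        decide_eq_false_iff_not]
      by_contra hc
      push Not at hc
      exact hout ⟨hc.1.1.2, hc.1.1.1, hc.2, hc.1.2⟩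
    have hcheck2 : pv_check_boundaries (a2_r + 0 * (a2_r - a1_r)) (a2_c + 0 * (a2_c - a1_c)) R C = false := by
      simp only [zero_mul, add_zero, pv_check_boundaries, Bool.and_eq_false_iff,
        decide_eq_false_iff_not]
      by_contra hc
      push Not at hc
      exact hout ⟨by omega, by omega, by omega, by omega⟩
    rw [pvLoopA_stop _ _ _ _ _ _ _ _ _ hcheck, pvLoopA_stop _ _ _ _ _ _ _ _ _ hcheck2,
      if_pos hdeg, if_neg hout]
  · -- generic pair: each while-loop equals the corresponding closed-form range pass
    have hdeg2 : ¬ (-(a1_r - a2_r) = 0 ∧ -(a1_c - a2_c) = 0) := by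
      intro h; exact hdeg ⟨by omega, by omega⟩
    obtain ⟨hn1_nonneg, hn1_bound, hn1_char⟩ :=
      pvSteps_char a1_r a1_c (a1_r - a2_r) (a1_c - a2_c) R C hdeg
    obtain ⟨hn2_nonneg, hn2_bound, hn2_char⟩ :=
      pvSteps_char a2_r a2_c (-(a1_r - a2_r)) (-(a1_c - a2_c)) R C hdeg2
    have e1 : a2_r - a1_r = -(a1_r - a2_r) := by ring
    have e2 : a2_c - a1_c = -(a1_c - a2_c) := by ring
    rw [if_neg hdeg, e1, e2]
    rw [pvLoopA_eq_fold a1_r a1_c (a1_r - a2_r) (a1_c - a2_c) R C _ s 0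
        (pvSteps a1_r a1_c (a1_r - a2_r) (a1_c - a2_c) R C) le_rfl hn1_nonneg (by omega)
        (fun k hk hkn => hn1_char k hk hkn)]
    rw [pvLoopA_eq_fold a2_r a2_c (-(a1_r - a2_r)) (-(a1_c - a2_c)) R C _ _ 0
        (pvSteps a2_r a2_c (-(a1_r - a2_r)) (-(a1_c - a2_c)) R C) le_rfl hn2_nonneg (by omega)
        (fun k hk hkn => hn2_char k hk hkn)]
    rfl
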